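-- pv_equiv track=rewrite | github.com/gillesfabre34/montpelliertransports | training/toptal/4_03_duplicate_events_within_time_window.py | duplicate_events_within_time_window
-- ===== SOURCE A (Python) =====
-- from collections import defaultdict
--
-- def duplicate_events_within_time_window(
--         events: list[tuple[str, int]], window_seconds: int
-- ) -> list[str]:
--     """Return user_ids that have at least two events within window_seconds."""
--     users = defaultdict(list[int])
--     for user_id, t in events:
--         users[user_id].append(t)
--
--     results = []
--     for user_id, ts in users.items():
--         sorted_ts = sorted(ts)
--         if len(ts) == 1:
--             continue
--         for i in range(1, len(ts)):
--             if sorted_ts[i] - sorted_ts[i - 1] <= window_seconds: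
--                 results.append(user_id)
--                 break
--
--     return results
-- ===== SOURCE B (Python) =====
-- def duplicate_events_within_time_window(
--         events: list[tuple[str, int]], window_seconds: int
-- ) -> list[str]:
--     """Return user_ids that have at least two events within window_seconds."""
--     order = list(dict.fromkeys(u for u, _ in events))
--     results = []
--     for u in order:
--         ts = [t for v, t in events if v == u]
--         if any(abs(a - b) <= window_seconds
--                for k, a in enumerate(ts) for b in ts[k + 1:]):
--             results.append(u)
--     return results
-- ===== Notes on version B (the rewrite author's own statement) =====
-- stated objective: alternative
-- what changed: B drops the defaultdict grouping and the per-user sort entirely: it dedups user ids in first-occurrence order, re-scans the event list to collect each user's timestamps, and tests all pairs with abs-difference; correct because some pair within the window exists iff an adjacent sorted pair does, and dict insertion order is first-occurrence order.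
import Mathlib
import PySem

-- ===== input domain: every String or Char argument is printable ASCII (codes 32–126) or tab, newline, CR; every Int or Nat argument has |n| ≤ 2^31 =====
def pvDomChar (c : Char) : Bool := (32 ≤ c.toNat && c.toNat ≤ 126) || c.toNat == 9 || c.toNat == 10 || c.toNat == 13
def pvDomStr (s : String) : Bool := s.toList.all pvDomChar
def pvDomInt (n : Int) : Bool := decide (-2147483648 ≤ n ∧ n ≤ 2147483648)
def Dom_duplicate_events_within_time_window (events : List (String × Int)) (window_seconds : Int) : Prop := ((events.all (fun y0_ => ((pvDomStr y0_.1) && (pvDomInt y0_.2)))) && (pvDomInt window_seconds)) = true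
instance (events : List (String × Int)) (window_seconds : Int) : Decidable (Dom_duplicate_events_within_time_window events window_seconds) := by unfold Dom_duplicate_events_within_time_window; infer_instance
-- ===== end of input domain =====

-- B drops the dict grouping and the per-user sort: it dedups user ids in first-occurrence
-- order, filters the event list per user, and runs an all-pairs abs-difference test
-- (objective: alternative — a pair within the window exists iff an adjacent sorted pair does).


-- ===== PORT A =====
-- defaultdict(list) grouping loop: users[user_id].append(t)
def pvGroupUsersA (events : List (String × Int)) : PySem.Dict String (List Int) :=
  events.foldl (fun d p => d.modify p.1 [] (· ++ [p.2])) PySem.Dict.empty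

-- A's inner loop: for i in range(1, len(ts)): if sorted_ts[i] - sorted_ts[i-1] <= w: append; break
-- (the walk over consecutive positions of sorted_ts, first hit wins)
def pvAdjHit (w : Int) : List Int → Bool
  | a :: b :: rest => if b - a ≤ w then true else pvAdjHit w (b :: rest)
  | _ => false

def duplicate_events_within_time_window (events : List (String × Int)) (window_seconds : Int) : List String :=
  let users := pvGroupUsersA events
  users.items.foldl (fun results p =>
    let sorted_ts := PySem.List.sorted p.2 (fun x => x) false
    if p.2.length = 1 then results
    else if pvAdjHit window_seconds sorted_ts then results ++ [p.1] else results) []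

-- ===== PORT B =====
-- B's any(...): abs(a - b) <= w for a at position k, b ranging over ts[k+1:]
def pvPairHit (w : Int) : List Int → Bool
  | a :: rest => rest.any (fun b => decide (|a - b| ≤ w)) || pvPairHit w rest
  | [] => false

def duplicate_events_within_time_window_alt (events : List (String × Int)) (window_seconds : Int) : List String :=
  let order := PySem.List.dedup (events.map (·.1))
  order.foldl (fun results u =>
    let ts := (events.filter (fun p => p.1 == u)).map (·.2)
    if pvPairHit window_seconds ts then results ++ [u] else results) []

-- ===== PRECONDITION & SPEC =====
def Spec_duplicate_events_within_time_window (events : List (String × Int)) (window_seconds : Int) (out : List String) : Prop := out = duplicate_events_within_time_window_alt events window_seconds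
instance (events : List (String × Int)) (window_seconds : Int) (out : List String) : Decidable (Spec_duplicate_events_within_time_window events window_seconds out) := by unfold Spec_duplicate_events_within_time_window; infer_instance

-- ===== CLAIM (what is proved, stated in full; the proofs are below) =====
def Claim_equal_duplicate_events_within_time_window : Prop := ∀ (events : List (String × Int)) (window_seconds : Int), Dom_duplicate_events_within_time_window events window_seconds → Spec_duplicate_events_within_time_window events window_seconds (duplicate_events_within_time_window events window_seconds)

-- ===== LEMMAS AND PROOFS =====

-- B's all-pairs test misses iff every pair is farther than w apart
theorem pvPairHit_eq_false_iff (w : Int) (ts : List Int) :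
    pvPairHit w ts = false ↔ ts.Pairwise (fun a b => w < |a - b|) := by
  induction ts with
  | nil => simp [pvPairHit]
  | cons a rest ih =>
    simp [pvPairHit, ih, List.pairwise_cons, not_le]

-- on a sorted list, A's adjacent test misses iff every pair is farther than w apart
theorem pvAdjHit_eq_false_iff (w : Int) :
    ∀ s : List Int, s.Pairwise (· ≤ ·) →
      (pvAdjHit w s = false ↔ s.Pairwise (fun a b => w < |a - b|)) := by
  intro s
  induction s with
  | nil => simp [pvAdjHit]
  | cons a t ih =>
    intro hs
    cases t with
    | nil => simp [pvAdjHit]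
    | cons b rest =>
      rw [List.pairwise_cons] at hs
      obtain ⟨hab, htail⟩ := hs
      have hble : ∀ x ∈ rest, b ≤ x := by
        intro x hx
        exact (List.pairwise_cons.mp htail).1 x hx
      constructor
      · intro h
        simp only [pvAdjHit] at h
        split_ifs at h with hle
        have hlt : w < b - a := by omega
        refine List.pairwise_cons.mpr ⟨?_, (ih htail).mp h⟩
        intro x hx
        have hax : a ≤ x := hab x hx
        rcases List.mem_cons.mp hx with rfl | hx'
        · rw [abs_of_nonpos (by omega)]; omega
        · have := hble x hx'
          rw [abs_of_nonpos (by omega)]; omega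
      · intro h
        obtain ⟨hhead, htl⟩ := List.pairwise_cons.mp h
        have h1 := hhead b (by simp)
        have hab' : a ≤ b := hab b (by simp)
        rw [abs_of_nonpos (by omega)] at h1
        simp only [pvAdjHit]
        rw [if_neg (by omega)]
        exact (ih htail).mpr htl

-- core: A's sorted adjacent scan and B's all-pairs scan decide the same thing
theorem pvAdjHit_sorted_eq_pvPairHit (w : Int) (ts : List Int) :
    pvAdjHit w (PySem.List.sorted ts (fun x => x) false) = pvPairHit w ts := by
  have hperm := PySem.List.sorted_perm ts (fun x => x) false
  have hsorted : (PySem.List.sorted ts (fun x => x) false).Pairwise (· ≤ ·) :=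
    PySem.List.sorted_pairwise ts (fun x => x)
  have hsym : ∀ {x y : Int}, w < |x - y| → w < |y - x| := by
    intro x y h; rwa [abs_sub_comm]
  have hiff : pvAdjHit w (PySem.List.sorted ts (fun x => x) false) = false ↔ pvPairHit w ts = false := by
    rw [pvAdjHit_eq_false_iff w _ hsorted, pvPairHit_eq_false_iff,
        List.Perm.pairwise_iff hsym hperm]
  cases h1 : pvAdjHit w (PySem.List.sorted ts (fun x => x) false) <;>
    cases h2 : pvPairHit w ts <;> simp_all

-- a single-timestamp user has no pair
theorem pvPairHit_singleton (w : Int) (ts : List Int) (h : ts.length = 1) :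
    pvPairHit w ts = false := by
  obtain ⟨a, rfl⟩ := List.length_eq_one_iff.mp h
  simp [pvPairHit]

-- the grouping dict's keys: distinct user ids in first-occurrence order
theorem keys_pvGroupUsersA (events : List (String × Int)) :
    (pvGroupUsersA events).keys = PySem.List.dedup (events.map (·.1)) := by
  unfold pvGroupUsersA
  rw [PySem.Dict.keys_foldl_modify_key]
  simp [PySem.Set.update, PySem.Set.ofList_eq_foldl, PySem.Dict.keys_empty,
    PySem.List.dedup_eq_ofList]

-- the grouping dict's value at any user: that user's timestamps in event order
theorem getD_pvGroupUsersA (events : List (String × Int)) (u : String) :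
    (pvGroupUsersA events).getD u [] = (events.filter (fun p => p.1 == u)).map (·.2) := by
  unfold pvGroupUsersA
  rw [PySem.Dict.getD_foldl_modify_append]
  simp [PySem.Dict.getD_empty]

theorem nodup_keys_pvGroupUsersA (events : List (String × Int)) :
    (pvGroupUsersA events).keys.Nodup := by
  unfold pvGroupUsersA
  exact PySem.Dict.nodup_keys_foldl_modify_key _ _ _ _ _ PySem.Dict.nodup_keys_empty

-- ===== VERDICT (by name: the statement is the Claim_ definition above) =====
theorem duplicate_events_within_time_window_spec : Claim_equal_duplicate_events_within_time_window := by
  intro events w _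
  show duplicate_events_within_time_window events w = duplicate_events_within_time_window_alt events w
  unfold duplicate_events_within_time_window duplicate_events_within_time_window_alt
  show (pvGroupUsersA events).items.foldl (fun results p =>
      if p.2.length = 1 then results
      else if pvAdjHit w (PySem.List.sorted p.2 (fun x => x) false) then results ++ [p.1] else results) []
    = (PySem.List.dedup (events.map (·.1))).foldl (fun results u =>
      if pvPairHit w ((events.filter (fun p => p.1 == u)).map (·.2)) then results ++ [u] else results) []
  have hitems : (pvGroupUsersA events).items
      = (pvGroupUsersA events).keys.map (fun k => (k, (pvGroupUsersA events).getD k [])) :=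
    PySem.Dict.items_eq_map_keys _ (nodup_keys_pvGroupUsersA events) []
  rw [hitems, keys_pvGroupUsersA, List.foldl_map]
  apply PySem.List.foldl_congr_mem
  intro results u _
  rw [getD_pvGroupUsersA]
  by_cases h1 : ((events.filter (fun p => p.1 == u)).map (·.2)).length = 1
  · simp [h1, pvPairHit_singleton w _ h1]
  · simp only [h1, if_false, pvAdjHit_sorted_eq_pvPairHit]
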